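-- pv_equiv track=rewrite | github.com/ruziniuuuuu/niukb | Code/PyAcmEnv/xhs/xhs3.py | func
-- ===== SOURCE A (Python) =====
-- def calc_tot_dist(n, m, a, j):
--     tot_dist = 0
--     for a_i in a:
--         tot_dist += min(abs(j - a_i), abs(a_i + n - j))
--     return tot_dist
--
-- def func(n, m, a):
--     a.sort()
--
--     min_tot_dist = float('inf')
--     optimal_position = 0
--
--     for j in range(1, n + 1):
--         tot_dist = calc_tot_dist(n, m, a, j)
--         if tot_dist < min_tot_dist:
--             min_tot_dist = tot_dist
--             optimal_position = j
--
--     return optimal_position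
-- ===== SOURCE B (Python) =====
-- # Faster exact re-implementation: sort + prefix sums + three binary searches per
-- # candidate position instead of an O(m) inner scan (O((n+m) log m) vs O(n*m)).
-- # Like A, it sorts `a` in place (same observable mutation).
-- from bisect import bisect_left
-- from itertools import accumulate
--
--
-- def func(n, m, a):
--     a.sort()
--     s = a
--     M = len(s)
--     pre = [0] + list(accumulate(s))
--     best_cost = None
--     best_j = 0
--     for j in range(1, n + 1):
--         p1 = j - n
--         # x is nearer to p1 = j - n than to j exactly when 2*x < 2*j - n,
--         # i.e. x < c with c = (2*j - n - 1) // 2 + 1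
--         c = (2 * j - n - 1) // 2 + 1
--         t1 = bisect_left(s, p1)
--         k = bisect_left(s, c)
--         t2 = bisect_left(s, j)
--         cost = (p1 * t1 - pre[t1]) \
--              + (pre[k] - pre[t1] - p1 * (k - t1)) \
--              + (j * (t2 - k) - (pre[t2] - pre[k])) \
--              + (pre[M] - pre[t2] - j * (M - t2))
--         if best_cost is None or cost < best_cost:
--             best_cost = cost
--             best_j = j
--     return best_j
-- ===== Notes on version B (the rewrite author's own statement) =====
-- stated objective: faster
-- what changed: Instead of rescanning all m points for each of the n candidate positions, B sorts once, builds prefix sums, and for each position evaluates the total distance in O(log m) with three binary searches (split at the nearer of the two reference points j and j-n, then split each side at that point).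
import Mathlib
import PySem

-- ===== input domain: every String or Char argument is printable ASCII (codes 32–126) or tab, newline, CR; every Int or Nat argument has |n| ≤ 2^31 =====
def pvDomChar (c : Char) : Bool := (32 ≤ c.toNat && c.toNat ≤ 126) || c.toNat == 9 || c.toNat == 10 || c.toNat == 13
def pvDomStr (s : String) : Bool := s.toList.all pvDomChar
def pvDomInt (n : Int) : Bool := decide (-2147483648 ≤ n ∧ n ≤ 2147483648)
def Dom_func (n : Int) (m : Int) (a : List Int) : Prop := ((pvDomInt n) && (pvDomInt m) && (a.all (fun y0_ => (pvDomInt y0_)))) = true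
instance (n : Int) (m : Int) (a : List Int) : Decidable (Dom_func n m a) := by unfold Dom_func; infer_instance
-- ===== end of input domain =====

-- B replaces A's O(m) inner scan per candidate position by prefix sums over the sorted
-- list and three binary searches per position (objective: faster). Both A and B sort
-- `a` in place; the equivalence proved here is about the return value.

-- ===== PORT A =====
def calc_tot_dist (n : Int) (m : Int) (a : List Int) (j : Int) : Int :=
  a.foldl (fun tot ai => tot + min |j - ai| |ai + n - j|) 0

-- float('inf') sentinel ported as `none` (the first iteration always replaces it)
def func (n : Int) (m : Int) (a : List Int) : Int :=
  let s := PySem.List.sorted a (fun x => x) false    -- a.sort() (in place; return value only)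
  ((PySem.List.pyRange 1 (n + 1) 1).foldl
    (fun (st : Option Int × Int) j =>
      let tot := calc_tot_dist n m s j
      match st.1 with
      | none => (some tot, j)
      | some mn => if tot < mn then (some tot, j) else st)
    (none, 0)).2

-- ===== PORT B =====
-- [0] + list(accumulate(s))
def prefixSums (s : List Int) : List Int := List.scanl (· + ·) 0 s

def func_alt (n : Int) (m : Int) (a : List Int) : Int :=
  let s := PySem.List.sorted a (fun x => x) false    -- a.sort()
  let M := s.length
  let pre := prefixSums s
  ((PySem.List.pyRange 1 (n + 1) 1).foldl
    (fun (st : Option Int × Int) j =>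
      let p1 := j - n
      let c := PySem.Int.floordiv (2 * j - n - 1) 2 + 1
      let t1 := PySem.List.bisectLeft s p1
      let k := PySem.List.bisectLeft s c
      let t2 := PySem.List.bisectLeft s j
      let cost := (p1 * (t1 : Int) - pre.getD t1 0)
        + (pre.getD k 0 - pre.getD t1 0 - p1 * ((k : Int) - (t1 : Int)))
        + (j * ((t2 : Int) - (k : Int)) - (pre.getD t2 0 - pre.getD k 0))
        + (pre.getD M 0 - pre.getD t2 0 - j * ((M : Int) - (t2 : Int)))
      match st.1 with
      | none => (some cost, j)
      | some mn => if cost < mn then (some cost, j) else st)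
    (none, 0)).2

-- ===== PRECONDITION & SPEC =====
def Spec_func (n : Int) (m : Int) (a : List Int) (out : Int) : Prop := out = func_alt n m a
instance (n : Int) (m : Int) (a : List Int) (out : Int) : Decidable (Spec_func n m a out) := by unfold Spec_func; infer_instance

-- ===== CLAIM (what is proved, stated in full; the proofs are below) =====
def Claim_equal_func : Prop := ∀ (n : Int) (m : Int) (a : List Int), Dom_func n m a → Spec_func n m a (func n m a)

-- ===== LEMMAS AND PROOFS =====

-- prefix sums: the t-th entry of scanl is the initial value plus the sum of the first t elements
theorem scanl_getD_sum (s : List Int) :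
    ∀ (i : Int) (t : Nat), t ≤ s.length → (List.scanl (· + ·) i s).getD t 0 = i + (s.take t).sum := by
  induction s with
  | nil => intro i t ht; simp at ht; subst ht; simp [List.scanl_nil]
  | cons x xs ih =>
    intro i t ht
    cases t with
    | zero => simp [List.scanl_cons]
    | succ t' =>
      rw [List.scanl_cons]
      simp only [List.getD, List.getElem?_cons_succ, List.take_succ_cons, List.sum_cons]
      have := ih (i + x) t' (by simpa using ht)
      simp only [List.getD] at this
      rw [this]; ring

-- for a sorted list, the first `bisectLeft s v` elements are exactly those < v
theorem take_bisectLeft_eq_filter (s : List Int) (v : Int)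
    (hs : s.Pairwise (· ≤ ·)) :
    s.take (PySem.List.bisectLeft s v) = s.filter (fun x => decide (x < v)) := by
  obtain ⟨hle, hlt, hge⟩ := PySem.List.bisectLeft_spec s v hs
  set t := PySem.List.bisectLeft s v with ht
  have h1 : s.filter (fun x => decide (x < v)) =
      (s.take t).filter (fun x => decide (x < v)) ++ (s.drop t).filter (fun x => decide (x < v)) := by
    rw [← List.filter_append, List.take_append_drop]
  have h2 : (s.take t).filter (fun x => decide (x < v)) = s.take t := by
    rw [List.filter_eq_self]
    intro a ha
    rw [List.mem_take_iff_getElem] at ha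
    obtain ⟨i, hi, rfl⟩ := ha
    exact decide_eq_true (hlt i (by omega) (by omega))
  have h3 : (s.drop t).filter (fun x => decide (x < v)) = [] := by
    rw [List.filter_eq_nil_iff]
    intro a ha
    rw [List.mem_drop_iff_getElem] at ha
    obtain ⟨i, hi, rfl⟩ := ha
    have := hge (t + i) (by omega) (by omega)
    simp only [decide_eq_true_eq]
    omega
  rw [h1, h2, h3, List.append_nil]

theorem bisectLeft_le (s : List Int) (v : Int) (hs : s.Pairwise (· ≤ ·)) :
    PySem.List.bisectLeft s v ≤ s.length :=
  (PySem.List.bisectLeft_spec s v hs).1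

theorem bisectLeft_eq_filter_length (s : List Int) (v : Int)
    (hs : s.Pairwise (· ≤ ·)) :
    PySem.List.bisectLeft s v = (s.filter (fun x => decide (x < v))).length := by
  rw [← take_bisectLeft_eq_filter s v hs, List.length_take]
  exact (Nat.min_eq_left (bisectLeft_le s v hs)).symm

theorem pre_getD_bisect (s : List Int) (v : Int) (hs : s.Pairwise (· ≤ ·)) :
    (prefixSums s).getD (PySem.List.bisectLeft s v) 0
      = (s.filter (fun x => decide (x < v))).sum := by
  rw [prefixSums, scanl_getD_sum s 0 _ (bisectLeft_le s v hs),
    take_bisectLeft_eq_filter s v hs, zero_add]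

theorem pre_getD_len (s : List Int) :
    (prefixSums s).getD s.length 0 = s.sum := by
  rw [prefixSums, scanl_getD_sum s 0 s.length le_rfl, List.take_length, zero_add]

-- pointwise: min(|j-x|, |x+n-j|) as a four-way case split at p1 = j-n, c, j
theorem min_abs_cases (n j x : Int) (hn : 1 ≤ n) :
    min |j - x| |x + n - j| =
      (if x < j - n then (j - n) - x
       else if x < PySem.Int.floordiv (2 * j - n - 1) 2 + 1 then x - (j - n)
       else if x < j then j - x
       else x - j) := by
  have hc : x < PySem.Int.floordiv (2 * j - n - 1) 2 + 1 ↔ 2 * x < 2 * j - n := by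
    rw [Int.lt_add_one_iff, PySem.Int.le_floordiv_iff_mul_le (by omega : (0:Int) < 2)]
    omega
  rcases iff_iff_implies_and_implies.mp hc with ⟨hc1, hc2⟩
  rcases abs_cases (j - x) with ⟨e1, l1⟩ | ⟨e1, l1⟩ <;>
    rcases abs_cases (x + n - j) with ⟨e2, l2⟩ | ⟨e2, l2⟩ <;>
    rw [e1, e2, min_def] <;> split_ifs with h h2 h3 h4 <;> omega

-- summing the four-way case split over any list, in terms of filters
theorem sum_cases_filters (p1 c j : Int) (h1 : p1 < c) (h2 : c ≤ j) (s : List Int) :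
    (s.map (fun x =>
        if x < p1 then p1 - x
        else if x < c then x - p1
        else if x < j then j - x
        else x - j)).sum =
      (p1 * ((s.filter (fun x => decide (x < p1))).length : Int)
          - (s.filter (fun x => decide (x < p1))).sum)
      + ((s.filter (fun x => decide (x < c))).sum
          - (s.filter (fun x => decide (x < p1))).sum
          - p1 * (((s.filter (fun x => decide (x < c))).length : Int)
              - ((s.filter (fun x => decide (x < p1))).length : Int)))
      + (j * (((s.filter (fun x => decide (x < j))).length : Int)
              - ((s.filter (fun x => decide (x < c))).length : Int))
          - ((s.filter (fun x => decide (x < j))).sum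
              - (s.filter (fun x => decide (x < c))).sum))
      + (s.sum - (s.filter (fun x => decide (x < j))).sum
          - j * ((s.length : Int)
              - ((s.filter (fun x => decide (x < j))).length : Int))) := by
  induction s with
  | nil => simp
  | cons x xs ih =>
    by_cases ha : x < p1 <;> by_cases hb : x < c <;> by_cases hc2 : x < j <;>
      first
      | omega
      | (simp only [List.map_cons, List.sum_cons, List.filter_cons, List.length_cons,
          ha, hb, hc2, decide_true, decide_false, if_true, if_false,
          List.sum_cons, List.length_cons]
         rw [ih]
         push_cast
         ring)

-- the per-position cost: A's inner scan equals B's prefix-sum/bisect formula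
theorem cost_eq (n m j : Int) (s : List Int) (hs : s.Pairwise (· ≤ ·)) (hn : 1 ≤ n) :
    calc_tot_dist n m s j =
      ((j - n) * ((PySem.List.bisectLeft s (j - n) : Nat) : Int)
          - (prefixSums s).getD (PySem.List.bisectLeft s (j - n)) 0)
      + ((prefixSums s).getD (PySem.List.bisectLeft s (PySem.Int.floordiv (2 * j - n - 1) 2 + 1)) 0
          - (prefixSums s).getD (PySem.List.bisectLeft s (j - n)) 0
          - (j - n) * (((PySem.List.bisectLeft s (PySem.Int.floordiv (2 * j - n - 1) 2 + 1) : Nat) : Int)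
              - ((PySem.List.bisectLeft s (j - n) : Nat) : Int)))
      + (j * (((PySem.List.bisectLeft s j : Nat) : Int)
              - ((PySem.List.bisectLeft s (PySem.Int.floordiv (2 * j - n - 1) 2 + 1) : Nat) : Int))
          - ((prefixSums s).getD (PySem.List.bisectLeft s j) 0
              - (prefixSums s).getD (PySem.List.bisectLeft s (PySem.Int.floordiv (2 * j - n - 1) 2 + 1)) 0))
      + ((prefixSums s).getD s.length 0 - (prefixSums s).getD (PySem.List.bisectLeft s j) 0
          - j * ((s.length : Int) - ((PySem.List.bisectLeft s j : Nat) : Int))) := by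
  have h1 : j - n < PySem.Int.floordiv (2 * j - n - 1) 2 + 1 := by
    rw [Int.lt_add_one_iff, PySem.Int.le_floordiv_iff_mul_le (by omega : (0:Int) < 2)]; omega
  have h2 : PySem.Int.floordiv (2 * j - n - 1) 2 + 1 ≤ j := by
    rw [Int.add_one_le_iff, PySem.Int.floordiv_lt_iff_lt_mul (by omega : (0:Int) < 2)]; omega
  rw [calc_tot_dist, PySem.List.foldl_add s (fun ai => min |j - ai| |ai + n - j|) 0, zero_add]
  have hmap : s.map (fun ai => min |j - ai| |ai + n - j|)
      = s.map (fun x =>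
          if x < j - n then (j - n) - x
          else if x < PySem.Int.floordiv (2 * j - n - 1) 2 + 1 then x - (j - n)
          else if x < j then j - x
          else x - j) :=
    List.map_congr_left (fun x _ => min_abs_cases n j x hn)
  rw [hmap, sum_cases_filters (j - n) (PySem.Int.floordiv (2 * j - n - 1) 2 + 1) j h1 h2 s,
    pre_getD_bisect s (j - n) hs,
    pre_getD_bisect s (PySem.Int.floordiv (2 * j - n - 1) 2 + 1) hs,
    pre_getD_bisect s j hs, pre_getD_len s,
    bisectLeft_eq_filter_length s (j - n) hs,
    bisectLeft_eq_filter_length s (PySem.Int.floordiv (2 * j - n - 1) 2 + 1) hs,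
    bisectLeft_eq_filter_length s j hs]

theorem func_eq_alt (n : Int) (m : Int) (a : List Int) : func n m a = func_alt n m a := by
  unfold func func_alt
  by_cases hn : n ≤ 0
  · rw [PySem.List.pyRange_one_eq_nil (by omega)]
    rfl
  · have hs : (PySem.List.sorted a (fun x => x) false).Pairwise (· ≤ ·) := by
      simpa using PySem.List.sorted_pairwise a (fun x => x)
    dsimp only
    congr 1
    apply PySem.List.foldl_congr_mem
    intro acc j hj
    simp only [cost_eq n m j (PySem.List.sorted a (fun x => x) false) hs (by omega)]

-- ===== VERDICT (by name: the statement is the Claim_ definition above) =====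
theorem func_spec : Claim_equal_func := by
  intro n m a _
  unfold Spec_func
  exact func_eq_alt n m a
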